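-- pv_equiv track=rewrite | github.com/Haksell/codeforces | problems/1759E.py | gbg
-- ===== SOURCE A (Python) =====
-- def gbg(h, a):
--     res = 0
--     l = 0
--     for p in a:
--         if p >= h and l == 0:
--             h *= 2
--             l += 1
--         if p >= h and l == 1:
--             h *= 3
--             l += 1
--         if p >= h and l == 2:
--             h *= 2
--             l += 1
--         if p >= h and l == 3:
--             break
--         res += 1
--         h += p // 2
--     return res
-- ===== SOURCE B (Python) =====
-- def gbg(h, a):
--     # Staged passes: l only ever increases, so instead of re-checking the level
--     # inside a per-element loop, run one absorbing pass per level (outer loop over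
--     # the multipliers), consuming elements while p < h, then level up and resume.
--     res = 0
--     i = 0
--     n = len(a)
--     for mult in (2, 3, 2):
--         while i < n and a[i] < h:
--             h += a[i] // 2
--             res += 1
--             i += 1
--         if i == n:
--             return res
--         h *= mult
--     while i < n and a[i] < h:
--         h += a[i] // 2
--         res += 1
--         i += 1
--     return res
-- ===== Notes on version B (the rewrite author's own statement) =====
-- stated objective: alternative
-- what changed: Inverts the loop nesting: instead of A's single pass over elements with per-element level checks, B runs one absorbing pass per level (outer loop over the multipliers (2,3,2), inner while consuming elements with p < h), exploiting that the level only ever increases.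
import Mathlib
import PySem

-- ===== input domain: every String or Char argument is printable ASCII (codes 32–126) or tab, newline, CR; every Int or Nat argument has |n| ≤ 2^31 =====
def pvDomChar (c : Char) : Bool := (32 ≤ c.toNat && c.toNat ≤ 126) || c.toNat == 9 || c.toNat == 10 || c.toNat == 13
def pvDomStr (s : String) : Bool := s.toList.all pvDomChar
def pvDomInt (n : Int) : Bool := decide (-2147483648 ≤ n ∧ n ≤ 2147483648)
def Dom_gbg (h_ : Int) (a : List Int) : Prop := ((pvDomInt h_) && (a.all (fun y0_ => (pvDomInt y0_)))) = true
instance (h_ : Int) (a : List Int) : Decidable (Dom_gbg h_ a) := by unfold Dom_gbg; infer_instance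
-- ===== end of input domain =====

-- B inverts the loop nesting: one absorbing pass per level (outer loop over the multipliers
-- [2,3,2], inner while consuming elements with p < h), exploiting that the level only increases
-- (objective: alternative; same asymptotic cost).


-- ===== PORT A =====
-- A's cascade of three sequential `if p >= h and l == k` blocks, as one step helper
def gbgStepA (p h l : Int) : Int × Int :=
  let s1 := if p ≥ h ∧ l = 0 then (h * 2, l + 1) else (h, l)
  let s2 := if p ≥ s1.1 ∧ s1.2 = 1 then (s1.1 * 3, s1.2 + 1) else s1
  if p ≥ s2.1 ∧ s2.2 = 2 then (s2.1 * 2, s2.2 + 1) else s2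

def gbgLoopA : List Int → Int → Int → Int → Int
  | [], _, _, res => res
  | p :: rest, h, l, res =>
    let s := gbgStepA p h l
    if p ≥ s.1 ∧ s.2 = 3 then res
    else gbgLoopA rest (s.1 + PySem.Int.floordiv p 2) s.2 (res + 1)

def gbg (h_ : Int) (a : List Int) : Int := gbgLoopA a h_ 0 0

-- ===== PORT B =====
-- B's inner `while i < n and a[i] < h: h += a[i] // 2; res += 1; i += 1`:
-- advancing the index i over a is transcribed as structural recursion on the remaining suffix;
-- returns (h, res, remaining suffix).
def gbgAbsorbB : List Int → Int → Int → Int × Int × List Int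
  | [], h, res => (h, res, [])
  | p :: t, h, res =>
    if p < h then gbgAbsorbB t (h + PySem.Int.floordiv p 2) (res + 1)
    else (h, res, p :: t)

-- B's outer `for mult in (2, 3, 2)` with early return when the input is exhausted;
-- the [] case is the final absorbing while after the for loop.
def gbgStagesB : List Int → Int → List Int → Int → Int
  | [], h, rest, res => (gbgAbsorbB rest h res).2.1
  | m :: ms, h, rest, res =>
    let s := gbgAbsorbB rest h res
    match s.2.2 with
    | [] => s.2.1
    | q :: t => gbgStagesB ms (s.1 * m) (q :: t) s.2.1

def gbg_alt (h_ : Int) (a : List Int) : Int := gbgStagesB [2, 3, 2] h_ a 0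

-- ===== PRECONDITION & SPEC =====
def Spec_gbg (h_ : Int) (a : List Int) (out : Int) : Prop := out = gbg_alt h_ a
instance (h_ : Int) (a : List Int) (out : Int) : Decidable (Spec_gbg h_ a out) := by unfold Spec_gbg; infer_instance

-- ===== CLAIM (what is proved, stated in full; the proofs are below) =====
def Claim_equal_gbg : Prop := ∀ (h_ : Int) (a : List Int), Dom_gbg h_ a → Spec_gbg h_ a (gbg h_ a)

-- ===== LEMMAS AND PROOFS =====

-- With p < h no if-block of A's cascade fires
lemma stepA_lt (p h l : Int) (hp : p < h) : gbgStepA p h l = (h, l) := by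
  simp [gbgStepA, not_le.mpr hp]

lemma stepA_3 (p h : Int) : gbgStepA p h 3 = (h, 3) := by
  norm_num [gbgStepA]

-- Cascades: a level-up followed by the rest of the cascade equals the cascade from the next level
lemma cascade0 (p h : Int) (hp : h ≤ p) : gbgStepA p h 0 = gbgStepA p (h * 2) 1 := by
  simp [gbgStepA, hp]

lemma cascade1 (p h : Int) (hp : h ≤ p) : gbgStepA p h 1 = gbgStepA p (h * 3) 2 := by
  simp [gbgStepA, hp]

lemma cascade2 (p h : Int) (hp : h ≤ p) : gbgStepA p h 2 = gbgStepA p (h * 2) 3 := by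
  simp [gbgStepA, hp]

-- A's loop body only looks at the step result
lemma loopA_step_congr (p : Int) (t : List Int) (h l h' l' res : Int)
    (e : gbgStepA p h l = gbgStepA p h' l') :
    gbgLoopA (p :: t) h l res = gbgLoopA (p :: t) h' l' res := by
  simp only [gbgLoopA, e]

lemma absorbB_cons_lt (p h res : Int) (t : List Int) (hp : p < h) :
    gbgAbsorbB (p :: t) h res = gbgAbsorbB t (h + PySem.Int.floordiv p 2) (res + 1) := by
  simp [gbgAbsorbB, hp]

lemma stagesB_cons_lt (ms : List Int) (p h res : Int) (t : List Int) (hp : p < h) :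
    gbgStagesB ms h (p :: t) res = gbgStagesB ms (h + PySem.Int.floordiv p 2) t (res + 1) := by
  cases ms <;> simp [gbgStagesB, absorbB_cons_lt _ _ _ _ hp]

-- Level 3 of A = the final absorbing pass of B
lemma eqL3 : ∀ (a : List Int) (h res : Int), gbgLoopA a h 3 res = (gbgAbsorbB a h res).2.1 := by
  intro a
  induction a with
  | nil => intro h res; rfl
  | cons p t ih =>
    intro h res
    by_cases hp : p < h
    · simp only [gbgLoopA, stepA_3, absorbB_cons_lt _ _ _ _ hp]
      rw [if_neg (fun hc => absurd hc.1 (not_le.mpr hp))]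
      exact ih _ _
    · simp only [gbgLoopA, stepA_3, gbgAbsorbB, if_neg hp]
      rw [if_pos ⟨not_lt.mp hp, trivial⟩]

lemma eqL2 : ∀ (a : List Int) (h res : Int), gbgLoopA a h 2 res = gbgStagesB [2] h a res := by
  intro a
  induction a with
  | nil => intro h res; rfl
  | cons p t ih =>
    intro h res
    by_cases hp : p < h
    · rw [stagesB_cons_lt _ _ _ _ _ hp, ← ih]
      simp only [gbgLoopA, stepA_lt _ _ _ hp]
      rw [if_neg (by norm_num)]
    · have hle : h ≤ p := not_lt.mp hp
      rw [loopA_step_congr p t h 2 (h * 2) 3 res (cascade2 p h hle), eqL3]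
      simp [gbgStagesB, gbgAbsorbB, hp]

lemma eqL1 : ∀ (a : List Int) (h res : Int), gbgLoopA a h 1 res = gbgStagesB [3, 2] h a res := by
  intro a
  induction a with
  | nil => intro h res; rfl
  | cons p t ih =>
    intro h res
    by_cases hp : p < h
    · rw [stagesB_cons_lt _ _ _ _ _ hp, ← ih]
      simp only [gbgLoopA, stepA_lt _ _ _ hp]
      rw [if_neg (by norm_num)]
    · have hle : h ≤ p := not_lt.mp hp
      rw [loopA_step_congr p t h 1 (h * 3) 2 res (cascade1 p h hle), eqL2]
      simp [gbgStagesB, gbgAbsorbB, hp]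

lemma eqL0 : ∀ (a : List Int) (h res : Int), gbgLoopA a h 0 res = gbgStagesB [2, 3, 2] h a res := by
  intro a
  induction a with
  | nil => intro h res; rfl
  | cons p t ih =>
    intro h res
    by_cases hp : p < h
    · rw [stagesB_cons_lt _ _ _ _ _ hp, ← ih]
      simp only [gbgLoopA, stepA_lt _ _ _ hp]
      rw [if_neg (by norm_num)]
    · have hle : h ≤ p := not_lt.mp hp
      rw [loopA_step_congr p t h 0 (h * 2) 1 res (cascade0 p h hle), eqL1]
      simp [gbgStagesB, gbgAbsorbB, hp]

-- ===== VERDICT (by name: the statement is the Claim_ definition above) =====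
theorem gbg_spec : Claim_equal_gbg := by
  intro h_ a _
  unfold Spec_gbg gbg gbg_alt
  exact eqL0 a h_ 0
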